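-- pv_equiv track=rewrite | github.com/openstack/microversion-parse | microversion_parse/__init__.py | fold_headers
-- ===== SOURCE A (Python) =====
-- import collections
--
-- def fold_headers(headers):
--     """Turn a list of headers into a folded dict."""
--     # If it behaves like a dict, return it. Webob uses objects which
--     # are not dicts, but behave like them.
--     try:
--         return dict((k.lower(), v) for k, v in headers.items())
--     except AttributeError:
--         pass
--     header_dict = collections.defaultdict(list)
--     for header, value in headers:
--         header_dict[header.lower()].append(value.strip())
--
--     folded_headers = {}
--     for header, value in header_dict.items():
--         folded_headers[header] = ','.join(value)
--
--     return folded_headers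
-- ===== SOURCE B (Python) =====
-- def fold_headers(headers):
--     """Turn a list of headers into a folded dict."""
--     # If it behaves like a dict, return it. Webob uses objects which
--     # are not dicts, but behave like them.
--     try:
--         return dict((k.lower(), v) for k, v in headers.items())
--     except AttributeError:
--         pass
--     folded = {}
--     for header, value in headers:
--         key = header.lower()
--         stripped = value.strip()
--         if key in folded:
--             folded[key] = folded[key] + "," + stripped
--         else:
--             folded[key] = stripped
--     return folded
-- ===== Notes on version B (the rewrite author's own statement) =====
-- stated objective: simpler
-- what changed: Replaces the two-stage grouping (defaultdict of stripped value lists, then a second loop joining each list with ',') by a single pass that builds the result dict directly, concatenating onto the existing comma-joined string when the lowered key was already seen.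
import Mathlib
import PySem

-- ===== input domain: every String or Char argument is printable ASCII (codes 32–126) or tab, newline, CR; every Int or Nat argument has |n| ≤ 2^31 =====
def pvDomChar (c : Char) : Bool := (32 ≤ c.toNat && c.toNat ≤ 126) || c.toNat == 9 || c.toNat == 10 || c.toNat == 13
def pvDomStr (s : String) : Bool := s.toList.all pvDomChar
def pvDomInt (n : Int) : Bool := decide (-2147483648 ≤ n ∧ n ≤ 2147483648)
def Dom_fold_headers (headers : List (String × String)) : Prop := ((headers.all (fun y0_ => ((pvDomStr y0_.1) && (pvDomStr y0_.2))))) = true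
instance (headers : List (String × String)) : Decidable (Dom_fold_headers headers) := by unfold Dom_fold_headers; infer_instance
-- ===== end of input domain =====

-- B folds the headers in ONE pass, concatenating onto the already-joined string per lowered key,
-- instead of A's two stages (group stripped values into lists, then join each with ','); same cost, simpler.
-- Under the type convention `headers` is a list, so A's `headers.items()` fast path always raises
-- AttributeError and is skipped; both ports implement the list path.

-- ===== PORT A =====
def fold_headers (headers : List (String × String)) : List (String × String) :=
  -- header_dict = defaultdict(list); for header, value in headers: header_dict[header.lower()].append(value.strip())
  let header_dict : PySem.Dict String (List String) :=
    headers.foldl (fun d p => d.modify (PySem.Str.lower p.1) [] (· ++ [PySem.Str.strip p.2]))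
      PySem.Dict.empty
  -- folded_headers = {}; for header, value in header_dict.items(): folded_headers[header] = ','.join(value)
  let folded_headers : PySem.Dict String String :=
    header_dict.items.foldl (fun d p => d.insert p.1 (PySem.Str.join "," p.2)) PySem.Dict.empty
  folded_headers.items

-- ===== PORT B =====
-- Python's `a + b` on str is concatenation: exact via the code-point lists
def pyStrAdd (a b : String) : String := String.ofList (a.toList ++ b.toList)

def fold_headers_alt (headers : List (String × String)) : List (String × String) :=
  (headers.foldl
    (fun d p =>
      let key := PySem.Str.lower p.1
      let stripped := PySem.Str.strip p.2
      if d.contains key then d.insert key (pyStrAdd (pyStrAdd (d.getD key "") ",") stripped)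
      else d.insert key stripped)
    (PySem.Dict.empty : PySem.Dict String String)).items

-- ===== PRECONDITION & SPEC =====
def Spec_fold_headers (headers : List (String × String)) (out : List (String × String)) : Prop := out = fold_headers_alt headers
instance (headers : List (String × String)) (out : List (String × String)) : Decidable (Spec_fold_headers headers out) := by unfold Spec_fold_headers; infer_instance

-- ===== CLAIM (what is proved, stated in full; the proofs are below) =====
def Claim_equal_fold_headers : Prop := ∀ (headers : List (String × String)), Dom_fold_headers headers → Spec_fold_headers headers (fold_headers headers)

-- ===== LEMMAS AND PROOFS =====

-- ','.join(xs + [y]) grows by "," ++ y when xs is nonempty (list-of-code-points form)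
theorem chars_join_snoc (sep : List Char) (b : List Char) :
    ∀ (as : List (List Char)), as ≠ [] →
      PySem.Chars.join sep (as ++ [b]) = PySem.Chars.join sep as ++ sep ++ b := by
  intro as
  induction as with
  | nil => intro h; exact absurd rfl h
  | cons a rest ih =>
    intro _
    cases rest with
    | nil => simp [PySem.Chars.join_cons_cons, PySem.Chars.join_singleton]
    | cons a' rest' =>
      have := ih (by simp)
      simp only [List.cons_append, PySem.Chars.join_cons_cons] at this ⊢
      rw [this]; simp [List.append_assoc]

theorem str_join_snoc (xs : List String) (hx : xs ≠ []) (y : String) :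
    PySem.Str.join "," (xs ++ [y]) = pyStrAdd (pyStrAdd (PySem.Str.join "," xs) ",") y := by
  apply String.toList_injective
  simp only [pyStrAdd, String.toList_ofList, PySem.Str.toList_join, List.map_append,
    List.map_singleton]
  exact chars_join_snoc _ _ _ (by simpa using hx)

theorem str_join_single (y : String) : PySem.Str.join "," [y] = y := by
  apply String.toList_injective
  rw [PySem.Str.toList_join, List.map_singleton]
  exact PySem.Chars.join_singleton _ _

-- the coupling invariant between A's grouping dict and B's directly-joined dict, pushed through the loop
theorem couple (hs : List (String × String)) :
    ∀ (dA : PySem.Dict String (List String)) (dB : PySem.Dict String String),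
    dB.keys = dA.keys → dA.keys.Nodup →
    (∀ k ∈ dA.keys, dA.getD k [] ≠ [] ∧ dB.getD k "" = PySem.Str.join "," (dA.getD k [])) →
    (let dA' := hs.foldl (fun d p => d.modify (PySem.Str.lower p.1) [] (· ++ [PySem.Str.strip p.2])) dA
     let dB' := hs.foldl
       (fun d p =>
         let key := PySem.Str.lower p.1
         let stripped := PySem.Str.strip p.2
         if d.contains key then d.insert key (pyStrAdd (pyStrAdd (d.getD key "") ",") stripped)
         else d.insert key stripped) dB
     dB'.keys = dA'.keys ∧ dA'.keys.Nodup ∧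
       ∀ k ∈ dA'.keys, dA'.getD k [] ≠ [] ∧ dB'.getD k "" = PySem.Str.join "," (dA'.getD k [])) := by
  induction hs with
  | nil => intro dA dB h1 h2 h3; exact ⟨h1, h2, h3⟩
  | cons p rest ih =>
    intro dA dB h1 h2 h3
    simp only [List.foldl_cons]
    set key := PySem.Str.lower p.1 with hkey
    set s := PySem.Str.strip p.2 with hs
    have hcB : dB.contains key = dA.contains key := by
      rw [PySem.Dict.contains_eq_decide_mem_keys, PySem.Dict.contains_eq_decide_mem_keys, h1]
    by_cases hc : dA.contains key = true
    · have hmem : key ∈ dA.keys := (PySem.Dict.contains_iff_mem_keys dA key).mp hc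
      simp only [hcB, hc, if_pos]
      apply ih
      · rw [PySem.Dict.keys_modify, PySem.Dict.keys_insert_of_contains _ _ hc,
          PySem.Dict.keys_insert_of_contains _ _ (hcB ▸ hc), h1]
      · rw [PySem.Dict.keys_modify, PySem.Dict.keys_insert_of_contains _ _ hc]; exact h2
      · intro k hk
        rw [PySem.Dict.keys_modify, PySem.Dict.keys_insert_of_contains _ _ hc] at hk
        rw [PySem.Dict.getD_modify, PySem.Dict.getD_insert]
        by_cases hkk : k = key
        · subst hkk
          have h3k := h3 key hk
          refine ⟨by simp, ?_⟩
          simp only [if_true]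
          rw [h3k.2, str_join_snoc _ h3k.1]
        · simp only [if_neg hkk]; exact h3 k hk
    · have hc' : dA.contains key = false := by simpa using hc
      have hnm : key ∉ dA.keys := fun hm => hc ((PySem.Dict.contains_iff_mem_keys dA key).mpr hm)
      simp only [hcB, hc', if_neg, Bool.false_eq_true, not_false_eq_true]
      apply ih
      · rw [PySem.Dict.keys_modify, PySem.Dict.keys_insert_of_not_contains _ _ hc',
          PySem.Dict.keys_insert_of_not_contains _ _ (hcB ▸ hc'), h1]
      · rw [PySem.Dict.keys_modify, PySem.Dict.keys_insert_of_not_contains _ _ hc']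
        exact List.Nodup.append h2 (List.nodup_singleton key) (by simpa using hnm)
      · intro k hk
        rw [PySem.Dict.keys_modify, PySem.Dict.keys_insert_of_not_contains _ _ hc'] at hk
        rw [PySem.Dict.getD_modify, PySem.Dict.getD_insert]
        by_cases hkk : k = key
        · subst hkk
          have : dA.getD key [] = [] := PySem.Dict.getD_of_not_contains _ _ hc'
          refine ⟨by simp [this], ?_⟩
          simp only [if_true, this]
          rw [show ([] : List String) ++ [s] = [s] by simp, str_join_single]
        · simp only [if_neg hkk]
          have hk' : k ∈ dA.keys := by
            rcases List.mem_append.mp hk with h | h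
            · exact h
            · exact absurd (List.mem_singleton.mp h) hkk
          exact h3 k hk'

-- ===== VERDICT (by name: the statement is the Claim_ definition above) =====
theorem fold_headers_spec : Claim_equal_fold_headers := by
  intro headers _
  unfold Spec_fold_headers
  simp only [fold_headers, fold_headers_alt]
  set dA := headers.foldl (fun d p => d.modify (PySem.Str.lower p.1) [] (· ++ [PySem.Str.strip p.2]))
    (PySem.Dict.empty : PySem.Dict String (List String)) with hdA
  set dB := headers.foldl
    (fun d p =>
      let key := PySem.Str.lower p.1
      let stripped := PySem.Str.strip p.2
      if d.contains key then d.insert key (pyStrAdd (pyStrAdd (d.getD key "") ",") stripped)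
      else d.insert key stripped)
    (PySem.Dict.empty : PySem.Dict String String) with hdB
  obtain ⟨hkeys, hnd, hval⟩ :=
    couple headers PySem.Dict.empty PySem.Dict.empty
      (by rw [PySem.Dict.keys_empty, PySem.Dict.keys_empty]) PySem.Dict.nodup_keys_empty
      (by intro k hk; rw [PySem.Dict.keys_empty] at hk; exact absurd hk (List.not_mem_nil))
  -- A's second loop inserts fresh distinct keys, so it maps over dA.items
  have hfresh : (dA.items.foldl (fun d p => d.insert p.1 (PySem.Str.join "," p.2))
      (PySem.Dict.empty : PySem.Dict String String)).items
      = dA.items.map (fun p => (p.1, PySem.Str.join "," p.2)) := by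
    have := PySem.Dict.items_foldl_insert_fresh dA.items (fun p => p.1)
      (fun p => PySem.Str.join "," p.2) (PySem.Dict.empty : PySem.Dict String String)
      (fun a _ => PySem.Dict.contains_empty _) (by exact hnd)
    simpa using this
  rw [hfresh, PySem.Dict.items_eq_map_keys dA hnd [],
    PySem.Dict.items_eq_map_keys dB (hkeys ▸ hnd) "", hkeys, List.map_map]
  apply List.map_congr_left
  intro k hk
  simp only [Function.comp_apply]
  rw [(hval k hk).2]
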